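-- pv_equiv track=rewrite | github.com/bedezign/ssh-concierge | src/ssh_concierge/argparse_ssh.py | extract_scp_host
-- ===== SOURCE A (Python) =====
-- _SCP_OPTS_WITH_ARG = frozenset(
--     'c D F i J l o P S'.split()
-- )
--
-- def _strip_user(destination: str) -> str:
--     """Strip user@ prefix from a destination string."""
--     if '@' in destination:
--         return destination.split('@', 1)[1]
--     return destination
--
-- def extract_scp_host(argv: list[str]) -> str | None:
--     """Extract first remote hostname from scp command-line args.
--
--     Parses: scp [options] source... target
--     Remote paths match [user@]host:path
--     Returns the hostname from the first remote path found, or None.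
--     """
--     i = 0
--     while i < len(argv):
--         arg = argv[i]
--
--         if arg.startswith('-') and len(arg) >= 2:
--             flag = arg[1]
--             if flag in _SCP_OPTS_WITH_ARG:
--                 if len(arg) > 2:
--                     i += 1
--                 else:
--                     i += 2
--                 continue
--             i += 1
--             continue
--
--         # Positional arg — check if it's a remote path (contains : but not /)
--         # A remote path looks like [user@]host:path
--         # Skip if it starts with / (local absolute path) or has no :
--         if ':' in arg and not arg.startswith('/'):
--             host_part = arg.split(':', 1)[0]
--             return _strip_user(host_part)
--
--         i += 1
--
--     return None
-- ===== SOURCE B (Python) =====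
-- _SCP_OPTS_WITH_ARG = frozenset(
--     'c D F i J l o P S'.split()
-- )
--
--
-- def _host_of(arg):
--     """Host part of a remote path [user@]host:path."""
--     host_part = arg.split(':', 1)[0]
--     if '@' in host_part:
--         return host_part.split('@', 1)[1]
--     return host_part
--
--
-- def extract_scp_host(argv):
--     # Pass 1: tokenize, collecting only true positional arguments.
--     positionals = []
--     i = 0
--     while i < len(argv):
--         arg = argv[i]
--         if arg.startswith('-') and len(arg) >= 2:
--             if arg[1] in _SCP_OPTS_WITH_ARG and len(arg) == 2:
--                 i += 2  # bare option flag: its value is the next token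
--             else:
--                 i += 1
--         else:
--             positionals.append(arg)
--             i += 1
--     # Pass 2: first positional that looks like a remote path.
--     for arg in positionals:
--         if ':' in arg and not arg.startswith('/'):
--             return _host_of(arg)
--     return None
-- ===== Notes on version B (the rewrite author's own statement) =====
-- stated objective: alternative
-- what changed: Replaces A's single early-returning index loop with two passes: a tokenizer that collects only the true positional arguments (consuming option values), then a separate scan of the positionals for the first remote path.
import Mathlib
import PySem

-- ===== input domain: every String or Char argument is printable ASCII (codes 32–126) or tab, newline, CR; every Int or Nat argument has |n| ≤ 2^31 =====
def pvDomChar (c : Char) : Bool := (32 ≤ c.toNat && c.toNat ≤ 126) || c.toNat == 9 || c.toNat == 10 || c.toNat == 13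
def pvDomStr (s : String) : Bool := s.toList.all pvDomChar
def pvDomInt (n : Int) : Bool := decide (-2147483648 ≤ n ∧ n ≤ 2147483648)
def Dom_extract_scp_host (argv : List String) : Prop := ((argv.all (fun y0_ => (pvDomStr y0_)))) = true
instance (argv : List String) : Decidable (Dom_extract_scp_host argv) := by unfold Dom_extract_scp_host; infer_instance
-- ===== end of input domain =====

-- B restructures A's single early-returning index loop into two passes (tokenize positionals, then
-- scan them for the first remote path); equal return value on every input (objective: alternative).

-- ===== PORT A =====
-- frozenset('c D F i J l o P S'.split()): one-char strings; membership of the one-char flag is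
-- exactly membership of its character in this list.
def scpOptsWithArg : List Char := ['c', 'D', 'F', 'i', 'J', 'l', 'o', 'P', 'S']

-- arg.split(':', 1)[0] (the other arms are unreachable: sep ≠ '' always yields ≥ 1 piece).
def splitColonHead (arg : String) : String :=
  match PySem.Str.splitMax? arg ":" 1 with
  | some (h :: _) => h
  | _ => arg

-- destination.split('@', 1)[1] when '@' in destination (the match arms other than two pieces are
-- unreachable then: sep ≠ '' and '@' present give exactly two pieces).
def stripUser (destination : String) : String :=
  if PySem.Str.isIn "@" destination then
    match PySem.Str.splitMax? destination "@" 1 with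
    | some (_ :: rest :: _) => rest
    | _ => destination
  else destination

-- the while loop over i: the tail from index i is the recursion argument; i += 2 drops two tokens.
def extract_scp_host (argv : List String) : Option String :=
  match argv with
  | [] => none
  | arg :: rest =>
    if PySem.Str.startswith arg "-" && decide (2 ≤ PySem.Str.len arg) then
      match PySem.Str.pyGet? arg 1 with   -- arg[1]; some _ whenever len(arg) ≥ 2
      | some flag =>
        if flag ∈ scpOptsWithArg then
          if decide (2 < PySem.Str.len arg) then extract_scp_host rest
          else extract_scp_host rest.tail
        else extract_scp_host rest
      | none => extract_scp_host rest     -- unreachable (len(arg) ≥ 2)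
    else
      if PySem.Str.isIn ":" arg && !PySem.Str.startswith arg "/" then
        some (stripUser (splitColonHead arg))   -- host_part = arg.split(':', 1)[0]
      else extract_scp_host rest
termination_by argv.length
decreasing_by all_goals (simp [List.length_tail]; try omega)

-- ===== PORT B =====
-- _host_of: host part of [user@]host:path.
def hostOf (arg : String) : String :=
  let hostPart := splitColonHead arg   -- arg.split(':', 1)[0]
  if PySem.Str.isIn "@" hostPart then
    match PySem.Str.splitMax? hostPart "@" 1 with
    | some (_ :: rest :: _) => rest
    | _ => hostPart            -- unreachable
  else hostPart

-- Pass 1: the tokenizing while loop, collecting the positional arguments.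
def collectPositionals (argv : List String) : List String :=
  match argv with
  | [] => []
  | arg :: rest =>
    if PySem.Str.startswith arg "-" && decide (2 ≤ PySem.Str.len arg) then
      match PySem.Str.pyGet? arg 1 with   -- arg[1]
      | some flag =>
        if flag ∈ scpOptsWithArg && decide (PySem.Str.len arg = 2) then
          collectPositionals rest.tail    -- i += 2
        else collectPositionals rest
      | none => collectPositionals rest   -- unreachable (len(arg) ≥ 2)
    else arg :: collectPositionals rest
termination_by argv.length
decreasing_by all_goals (simp [List.length_tail]; try omega)

-- Pass 2: the for loop over the positionals.
def findRemote (positionals : List String) : Option String :=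
  match positionals with
  | [] => none
  | arg :: rest =>
    if PySem.Str.isIn ":" arg && !PySem.Str.startswith arg "/" then some (hostOf arg)
    else findRemote rest

def extract_scp_host_alt (argv : List String) : Option String :=
  findRemote (collectPositionals argv)

-- ===== PRECONDITION & SPEC =====
def Spec_extract_scp_host (argv : List String) (out : Option String) : Prop := out = extract_scp_host_alt argv
instance (argv : List String) (out : Option String) : Decidable (Spec_extract_scp_host argv out) := by unfold Spec_extract_scp_host; infer_instance

-- ===== CLAIM (what is proved, stated in full; the proofs are below) =====
def Claim_equal_extract_scp_host : Prop := ∀ (argv : List String), Dom_extract_scp_host argv → Spec_extract_scp_host argv (extract_scp_host argv)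

-- ===== LEMMAS AND PROOFS =====

lemma pyGet1 {a : Type} (xs : List a) : PySem.List.pyGet? xs 1 = xs[1]? := by
  rw [PySem.List.pyGet?_of_nonneg _ (by norm_num)]
  norm_num

lemma hostOf_eq (arg : String) : hostOf arg = stripUser (splitColonHead arg) := by
  unfold hostOf stripUser
  rcases h : PySem.Str.isIn "@" (splitColonHead arg) with _ | _ <;> simp at h <;> simp [h]

lemma extract_eq_two_pass (argv : List String) :
    extract_scp_host argv = findRemote (collectPositionals argv) := by
  induction argv using extract_scp_host.induct with
  | case1 => simp [extract_scp_host, collectPositionals, findRemote]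
  | case2 arg rest hflag flag hget hmem hlen ih =>
    rw [extract_scp_host, collectPositionals]
    simp at hflag hget hlen
    rw [pyGet1] at hget
    have hne : ((arg.length : Int) ≠ 2) := by omega
    simp [pyGet1, hflag, hget, hmem, hlen, hne, ih]
  | case3 arg rest hflag flag hget hmem hlen ih =>
    rw [extract_scp_host, collectPositionals]
    simp at hflag hget hlen
    rw [pyGet1] at hget
    have heq : ((arg.length : Int) = 2) := by omega
    simp [hflag, hget, hmem, heq, ih]
  | case4 arg rest hflag flag hget hmem ih =>
    rw [extract_scp_host, collectPositionals]
    simp at hflag hget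
    rw [pyGet1] at hget
    simp [pyGet1, hflag, hget, hmem, ih]
  | case5 arg rest hflag hget ih =>
    rw [extract_scp_host, collectPositionals]
    simp at hflag
    simp only [PySem.Str.pyGet?_eq, PySem.Chars.pyGet?_eq_listPyGet?, pyGet1,
      List.getElem?_eq_none_iff, String.length_toList] at hget
    omega
  | case6 arg rest hflag hrem =>
    rw [extract_scp_host, collectPositionals]
    simp only [Bool.not_eq_true] at hflag
    simp only [hflag, Bool.false_eq_true, if_false]
    rw [findRemote]
    simp at hrem
    simp [hrem, hostOf_eq]
  | case7 arg rest hflag hrem ih =>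
    rw [extract_scp_host, collectPositionals]
    simp only [Bool.not_eq_true] at hflag hrem
    simp only [hflag, Bool.false_eq_true, if_false]
    rw [findRemote]
    simp [hostOf_eq, ih]

-- ===== VERDICT (by name: the statement is the Claim_ definition above) =====
theorem extract_scp_host_spec : Claim_equal_extract_scp_host := by
  intro argv _
  unfold Spec_extract_scp_host extract_scp_host_alt
  exact extract_eq_two_pass argv
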